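-- pv_equiv track=rewrite | github.com/SergioSboy/algorithms_and_data_structures | Введение, сортировки, бинарный поиск/bin9.py | podriad
-- ===== SOURCE A (Python) =====
-- def podriad(n, a):
--     m = 0
--     while n >= 0:
--         if a[n] == 1:
--             m += 1
--         else:
--             return m, n
--         n -= 1
--     return m, n
-- ===== SOURCE B (Python) =====
-- def podriad(n, a):
--     # Staged: materialize the reversed prefix a[n::-1], then the answer is the
--     # index of its first non-1 element; stopping index recovered as n - m.
--     if n < 0:
--         return 0, n
--     rev = a[n::-1]
--     m = next((k for k, x in enumerate(rev) if x != 1), len(rev))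
--     return m, n - m
-- ===== Notes on version B (the rewrite author's own statement) =====
-- stated objective: alternative
-- what changed: B materializes the reversed prefix a[n::-1] and searches it for the index of its first non-1 element, recovering the stopping index as n - m, instead of A's live backward scan with a moving pointer and two exit points.
import Mathlib
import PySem

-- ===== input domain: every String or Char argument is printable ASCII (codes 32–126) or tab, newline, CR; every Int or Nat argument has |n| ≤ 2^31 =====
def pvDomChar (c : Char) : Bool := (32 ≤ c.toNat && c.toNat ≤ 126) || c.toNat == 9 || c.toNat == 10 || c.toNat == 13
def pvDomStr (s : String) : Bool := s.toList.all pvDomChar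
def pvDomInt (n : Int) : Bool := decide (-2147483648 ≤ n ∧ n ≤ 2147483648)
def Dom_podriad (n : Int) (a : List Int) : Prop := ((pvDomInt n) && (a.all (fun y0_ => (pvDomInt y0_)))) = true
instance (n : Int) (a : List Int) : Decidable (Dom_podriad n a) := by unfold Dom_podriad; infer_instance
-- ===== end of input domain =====

-- B replaces A's live backward scan (moving pointer, two exits) by a staged computation:
-- materialize the reversed prefix a[n::-1], search it for the first non-1 element,
-- and recover the stopping index arithmetically as n - m (alternative decomposition).


-- ===== PORT A =====
-- A's while loop: moving index n, count m; two exits. The loop runs at most n+1 times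
-- (it stops when n < 0), so fuel = (n+1).toNat makes the fuel-0 case reachable only when
-- n < 0, where it returns (m, n) exactly as Python's final 'return m, n' does.
-- pyGet? a n = some 1 is Python's 'a[n] == 1'; the inner else covers both a[n] != 1
-- (Python's 'return m, n') and IndexError (pyGet? = none, excluded by Pre_podriad).
def podriadLoopA (fuel : Nat) (m n : Int) (a : List Int) : Int × Int :=
  match fuel with
  | 0 => (m, n)
  | fuel + 1 =>
    if 0 ≤ n then
      if PySem.List.pyGet? a n = some 1 then podriadLoopA fuel (m + 1) (n - 1) a
      else (m, n)
    else (m, n)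

def podriad (n : Int) (a : List Int) : Int × Int := podriadLoopA (n + 1).toNat 0 n a

-- ===== PORT B =====
-- B's generator search 'next((k for k, x in enumerate(rev) if x != 1), len(rev))':
-- index of the first non-1 element of rev, defaulting to len(rev).
def firstNon1 : List Int → Nat
  | [] => 0
  | x :: xs => if x ≠ 1 then 0 else firstNon1 xs + 1

-- Hand port of the slice a[n::-1] for n ≥ 0 (guarded by B's 'if n < 0' branch):
-- exact there — Python starts at min(n, len-1) and walks down to 0, i.e. the
-- reverse of the first n+1 elements.
def podriad_alt (n : Int) (a : List Int) : Int × Int :=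
  if n < 0 then (0, n)
  else
    let rev := (a.take (n + 1).toNat).reverse
    let m : Int := firstNon1 rev
    (m, n - m)

-- ===== PRECONDITION & SPEC =====
-- Pre_ excludes exactly the inputs where the Python A raises IndexError: 0 ≤ n with n ≥ len(a).
def Pre_podriad (n : Int) (a : List Int) : Prop := n < (a.length : Int)
instance (n : Int) (a : List Int) : Decidable (Pre_podriad n a) := by unfold Pre_podriad; infer_instance
def pvWitness_podriad : Int × List Int := (2, [1, 1, 0])

def Spec_podriad (n : Int) (a : List Int) (out : Int × Int) : Prop := out = podriad_alt n a
instance (n : Int) (a : List Int) (out : Int × Int) : Decidable (Spec_podriad n a out) := by unfold Spec_podriad; infer_instance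

-- ===== CLAIM (what is proved, stated in full; the proofs are below) =====
def Claim_equal_podriad : Prop := ∀ (n : Int) (a : List Int), Dom_podriad n a → Pre_podriad n a → Spec_podriad n a (podriad n a)

-- ===== LEMMAS AND PROOFS =====

-- A's loop on (m, n) with fuel (n+1).toNat returns m plus the first-non-1 index of the
-- reversed prefix, and the stopping index n minus that index.
theorem loopA_eq (k : Nat) : ∀ (n m : Int) (a : List Int), (n + 1).toNat = k → 0 ≤ n →
    n < (a.length : Int) →
    podriadLoopA k m n a =
      (m + (firstNon1 ((a.take (n + 1).toNat).reverse) : Int),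
       n - (firstNon1 ((a.take (n + 1).toNat).reverse) : Int)) := by
  induction k with
  | zero => intro n m a hk hn _; exfalso; omega
  | succ k ih =>
    intro n m a hk hn hlen
    have hnat : n.toNat < a.length := by omega
    have hget : PySem.List.pyGet? a n = some (a[n.toNat]) :=
      PySem.List.pyGet?_eq_some_getElem a hn hlen
    have htake : (a.take (n + 1).toNat).reverse
        = a[n.toNat] :: (a.take n.toNat).reverse := by
      have : (n + 1).toNat = n.toNat + 1 := by omega
      rw [this, List.take_add_one, List.reverse_append]
      simp [List.getElem?_eq_getElem hnat]
    rw [podriadLoopA, if_pos hn, hget, htake]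
    by_cases hv : a[n.toNat] = 1
    · rw [if_pos (by rw [hv]), firstNon1, if_neg (by simp [hv])]
      by_cases hzero : n = 0
      · subst hzero
        have hk0 : k = 0 := by omega
        subst hk0
        rw [podriadLoopA]
        simp
      · have hrec := ih (n - 1) (m + 1) a (by omega) (by omega) (by omega)
        have : (n - 1 + 1).toNat = n.toNat := by omega
        rw [this] at hrec
        rw [hrec, Prod.mk.injEq]
        constructor <;> push_cast <;> ring
    · rw [if_neg (by simp [hv]), firstNon1, if_pos hv]
      simp

-- ===== VERDICT (by name: the statement is the Claim_ definition above) =====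
theorem podriad_spec : Claim_equal_podriad := by
  intro n a _ hpre
  unfold Spec_podriad podriad podriad_alt
  by_cases hn : n < 0
  · rw [if_pos hn]
    have : (n + 1).toNat = 0 := by omega
    rw [this, podriadLoopA]
  · rw [if_neg hn]
    rw [loopA_eq ((n + 1).toNat) n 0 a rfl (by omega) hpre]
    simp
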